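-- pv_equiv track=rewrite | github.com/FelipeTamaki/Trabajo-Practico | Codigo/H_planificador.py | _encontrar_rutas_con_dfs
-- ===== SOURCE A (Python) =====
-- def _encontrar_rutas_con_dfs(grafo, inicio, fin, max_depth=5):
--     """Encuentra rutas usando DFS con profundidad limitada."""
--     rutas = []
--
--     def dfs(visitados, actual):
--         if len(visitados) > max_depth:
--             return
--         if actual == fin:
--             rutas.append(visitados[:])
--             return
--         for vecino, _ in grafo.get(actual, []):
--             if vecino not in visitados:
--                 visitados.append(vecino)
--                 dfs(visitados, vecino)
--                 visitados.pop()
--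
--     dfs([inicio], inicio)
--     return rutas
-- ===== SOURCE B (Python) =====
-- def _encontrar_rutas_con_dfs(grafo, inicio, fin, max_depth=5):
--     """Iterative DFS: explicit stack of full paths instead of recursion over a shared mutated buffer."""
--     rutas = []
--     stack = [[inicio]]
--     while stack:
--         path = stack.pop()
--         if len(path) > max_depth:
--             continue
--         actual = path[-1]
--         if actual == fin:
--             rutas.append(path)
--             continue
--         for vecino, _ in reversed(grafo.get(actual, [])):
--             if vecino not in path:
--                 stack.append(path + [vecino])
--     return rutas
-- ===== Notes on version B (the rewrite author's own statement) =====
-- stated objective: idiomatic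
-- what changed: Replaces the recursive dfs over a shared mutated visitados buffer (with append/pop backtracking and a nonlocal rutas list) by an iterative DFS over an explicit stack of complete path lists, pushing filtered neighbor extensions in reversed order so the LIFO pop reproduces the recursive preorder exactly.
import Mathlib
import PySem

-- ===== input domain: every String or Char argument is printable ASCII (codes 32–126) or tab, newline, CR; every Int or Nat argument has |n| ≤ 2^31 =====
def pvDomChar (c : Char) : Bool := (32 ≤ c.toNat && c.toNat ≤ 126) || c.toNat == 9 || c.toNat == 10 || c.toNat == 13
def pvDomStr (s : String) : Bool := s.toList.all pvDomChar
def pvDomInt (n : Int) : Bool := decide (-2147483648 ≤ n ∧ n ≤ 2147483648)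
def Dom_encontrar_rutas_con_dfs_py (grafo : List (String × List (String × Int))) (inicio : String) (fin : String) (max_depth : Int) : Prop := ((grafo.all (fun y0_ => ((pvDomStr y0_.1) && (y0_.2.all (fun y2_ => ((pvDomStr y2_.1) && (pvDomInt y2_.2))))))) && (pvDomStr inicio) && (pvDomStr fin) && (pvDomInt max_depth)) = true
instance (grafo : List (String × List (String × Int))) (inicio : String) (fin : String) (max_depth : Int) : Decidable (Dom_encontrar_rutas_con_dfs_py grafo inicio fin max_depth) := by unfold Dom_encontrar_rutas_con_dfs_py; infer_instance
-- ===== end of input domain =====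

-- B replaces A's recursion over a shared mutated buffer by an iterative DFS with an explicit
-- stack of full paths (objective: idiomatic / alternative data structure; same output, same order).

-- ===== PORT A =====
-- A's inner `dfs(visitados, actual)` with the nonlocal `rutas` threaded as an accumulator,
-- and its `for vecino, _ in grafo.get(actual, [])` loop as the mutual helper pvDfsALoop.
mutual
def pvDfsA (g : List (String × List (String × Int))) (fin_ : String) (md : Int)
    (vis : List String) (actual : String) (rutas : List (List String)) : List (List String) :=
  if (vis.length : Int) > md then rutas
  else if actual = fin_ then rutas ++ [vis]
  else pvDfsALoop g fin_ md vis ((PySem.Dict.mk g).getD actual []) rutas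
termination_by ((md + 1 - (vis.length : Int)).toNat, ((PySem.Dict.mk g).getD actual []).length + 1)

def pvDfsALoop (g : List (String × List (String × Int))) (fin_ : String) (md : Int)
    (vis : List String) (neigh : List (String × Int)) (rutas : List (List String)) : List (List String) :=
  match neigh with
  | [] => rutas
  | (v, _) :: rest =>
    pvDfsALoop g fin_ md vis rest
      (if v ∈ vis then rutas
       -- totality guard: when it fires, pvDfsA (vis ++ [v]) would return rutas by its own first branch
       else if (vis.length : Int) > md then rutas
       else pvDfsA g fin_ md (vis ++ [v]) v rutas)
termination_by ((md + 1 - (vis.length : Int)).toNat, neigh.length)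
end

def encontrar_rutas_con_dfs_py (grafo : List (String × List (String × Int))) (inicio : String) (fin : String) (max_depth : Int) : List (List String) :=
  pvDfsA grafo fin max_depth [inicio] inicio []

-- ===== PORT B =====
-- weight of a stack entry / measure of the stack, for termination of the while loop only
def pvW (md : Int) (C : Nat) (p : List String) : Nat := C ^ (md + 1 - (p.length : Int)).toNat
def pvMeasure (md : Int) (C : Nat) (stack : List (List String)) : Nat := (stack.map (pvW md C)).sum


-- first-match adjacency list is no longer than the total adjacency size (termination helper)
theorem pvAdjLen (g : List (String × List (String × Int))) (k : String) :
    ((PySem.Dict.mk g).getD k []).length ≤ (g.map fun e => e.2.length).sum := by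
  induction g with
  | nil => simp [PySem.Dict.getD, PySem.Dict.get?]
  | cons e t ih =>
    rw [PySem.Dict.getD_eq_get?_getD]
    rcases e with ⟨ek, ev⟩
    rw [PySem.Dict.get?_mk_cons]
    cases hek : (ek == k) with
    | true =>
      simp only [if_pos, List.map_cons, List.sum_cons, Option.getD_some]
      omega
    | false =>
      simp only [Bool.false_eq_true, if_neg, not_false_iff]
      rw [← PySem.Dict.getD_eq_get?_getD]
      simp only [List.map_cons, List.sum_cons]
      omega

-- pushing the (filtered) children of `path` adds at most |l| entries of weight C^(md-|path|)
theorem pvFoldlPushBound (md : Int) (C : Nat) (path : List String) (l : List (String × Int)) (st0 : List (List String)) :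
    pvMeasure md C (l.foldl (fun st p => if p.1 ∈ path then st else (path ++ [p.1]) :: st) st0)
      ≤ l.length * C ^ (md - (path.length : Int)).toNat + pvMeasure md C st0 := by
  induction l generalizing st0 with
  | nil => simp
  | cons p l ih =>
    simp only [List.foldl_cons, List.length_cons]
    calc pvMeasure md C (l.foldl _ (if p.1 ∈ path then st0 else (path ++ [p.1]) :: st0))
        ≤ l.length * C ^ (md - (path.length : Int)).toNat
            + pvMeasure md C (if p.1 ∈ path then st0 else (path ++ [p.1]) :: st0) := ih _
      _ ≤ (l.length + 1) * C ^ (md - (path.length : Int)).toNat + pvMeasure md C st0 := by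
          split
          · rw [Nat.succ_mul]; omega
          · have : pvMeasure md C ((path ++ [p.1]) :: st0)
                = C ^ (md - (path.length : Int)).toNat + pvMeasure md C st0 := by
              simp [pvMeasure, pvW, List.length_append]
            rw [this, Nat.succ_mul]; omega

-- the stack measure strictly decreases across one expansion step of the while loop
theorem pvPushDecreases (g : List (String × List (String × Int))) (md : Int)
    (path : List String) (rest : List (List String)) (h : (path.length : Int) ≤ md) :
    pvMeasure md ((g.map fun e => e.2.length).sum + 2)
      (((PySem.Dict.mk g).getD (path.getLastD "") []).reverse.foldl
        (fun st p => if p.1 ∈ path then st else (path ++ [p.1]) :: st) rest)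
    < pvMeasure md ((g.map fun e => e.2.length).sum + 2) (path :: rest) := by
  set C := (g.map fun e => e.2.length).sum + 2 with hC
  set l := ((PySem.Dict.mk g).getD (path.getLastD "") []) with hl
  set E := C ^ (md - (path.length : Int)).toNat with hE
  have hlen : l.length ≤ C - 2 := by
    have h5 := pvAdjLen g (path.getLastD "")
    rw [← hl] at h5
    omega
  have hEpos : 0 < E := Nat.pow_pos (by omega)
  have hW : pvW md C path = C * E := by
    rw [pvW, hE, ← pow_succ']
    congr 1
    omega
  have h1 : pvMeasure md C (l.reverse.foldl (fun st p => if p.1 ∈ path then st else (path ++ [p.1]) :: st) rest)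
      ≤ l.length * E + pvMeasure md C rest := by
    have := pvFoldlPushBound md C path l.reverse rest
    simpa [hE] using this
  have h2 : l.length * E ≤ (C - 2) * E := Nat.mul_le_mul_right E hlen
  have h3 : (C - 2) * E < C * E := (Nat.mul_lt_mul_right hEpos).mpr (by omega)
  have h4 : pvMeasure md C (path :: rest) = C * E + pvMeasure md C rest := by
    simp [pvMeasure, hW]
  omega

-- B's `while stack:` loop; stack top is the list head (`pop` = head, `append` = cons).
def pvRunStack (g : List (String × List (String × Int))) (fin_ : String) (md : Int)
    (stack : List (List String)) (rutas : List (List String)) : List (List String) :=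
  match stack with
  | [] => rutas
  | path :: rest =>
    if (path.length : Int) > md then pvRunStack g fin_ md rest rutas
    else
      -- `actual = path[-1]`: stack entries are always nonempty, so getLastD is exact
      let actual := path.getLastD ""
      if actual = fin_ then pvRunStack g fin_ md rest (rutas ++ [path])
      else pvRunStack g fin_ md
        (((PySem.Dict.mk g).getD actual []).reverse.foldl
          (fun st p => if p.1 ∈ path then st else (path ++ [p.1]) :: st) rest) rutas
termination_by pvMeasure md ((g.map fun e => e.2.length).sum + 2) stack
decreasing_by
  · have := Nat.pow_pos (n := (md + 1 - (path.length : Int)).toNat) (show 0 < (g.map fun e => e.2.length).sum + 2 by omega)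
    simp [pvMeasure, pvW]
  · have := Nat.pow_pos (n := (md + 1 - (path.length : Int)).toNat) (show 0 < (g.map fun e => e.2.length).sum + 2 by omega)
    simp [pvMeasure, pvW]
  · exact pvPushDecreases g md path rest (by omega)

def encontrar_rutas_con_dfs_py_alt (grafo : List (String × List (String × Int))) (inicio : String) (fin : String) (max_depth : Int) : List (List String) :=
  pvRunStack grafo fin max_depth [[inicio]] []

-- ===== PRECONDITION & SPEC =====
def Spec_encontrar_rutas_con_dfs_py (grafo : List (String × List (String × Int))) (inicio : String) (fin : String) (max_depth : Int) (out : List (List String)) : Prop := out = encontrar_rutas_con_dfs_py_alt grafo inicio fin max_depth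
instance (grafo : List (String × List (String × Int))) (inicio : String) (fin : String) (max_depth : Int) (out : List (List String)) : Decidable (Spec_encontrar_rutas_con_dfs_py grafo inicio fin max_depth out) := by unfold Spec_encontrar_rutas_con_dfs_py; infer_instance

-- ===== CLAIM (what is proved, stated in full; the proofs are below) =====
def Claim_equal_encontrar_rutas_con_dfs_py : Prop := ∀ (grafo : List (String × List (String × Int))) (inicio : String) (fin : String) (max_depth : Int), Dom_encontrar_rutas_con_dfs_py grafo inicio fin max_depth → Spec_encontrar_rutas_con_dfs_py grafo inicio fin max_depth (encontrar_rutas_con_dfs_py grafo inicio fin max_depth)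

-- ===== LEMMAS AND PROOFS =====

-- processing one (nonempty) path on the stack produces exactly what A's recursive dfs appends
theorem pvMain (g : List (String × List (String × Int))) (fin_ : String) (md : Int) :
    ∀ (k : Nat) (path : List String) (actual : String),
      path.getLastD "" = actual → path ≠ [] → (md + 1 - (path.length : Int)).toNat ≤ k →
      ∀ stack rutas,
        pvRunStack g fin_ md (path :: stack) rutas
          = pvRunStack g fin_ md stack (pvDfsA g fin_ md path actual rutas) := by
  intro k
  induction k with
  | zero =>
    intro path actual hlast hne hk stack rutas
    have hgt : (path.length : Int) > md := by omega
    conv_lhs => rw [pvRunStack]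
    rw [pvDfsA]
    simp [hgt]
  | succ k ih =>
    intro path actual hlast hne hk stack rutas
    by_cases hgt : (path.length : Int) > md
    · conv_lhs => rw [pvRunStack]
      rw [pvDfsA]
      simp [hgt]
    · by_cases hfin : actual = fin_
      · have hlast' : path.getLast?.getD "" = actual := by
          rw [← List.getLastD_eq_getLast?]; exact hlast
        conv_lhs => rw [pvRunStack]
        rw [pvDfsA]
        simp [hgt, hlast', hfin]
      · have inner : ∀ (l : List (String × Int)) (stack rutas : List (List String)),
            pvRunStack g fin_ md
              (l.reverse.foldl (fun st p => if p.1 ∈ path then st else (path ++ [p.1]) :: st) stack) rutas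
            = pvRunStack g fin_ md stack (pvDfsALoop g fin_ md path l rutas) := by
          intro l
          induction l with
          | nil =>
            intro stack rutas
            rw [pvDfsALoop]
            rfl
          | cons p l ihl =>
            intro stack rutas
            rcases p with ⟨v, w⟩
            rw [pvDfsALoop]
            simp only [List.reverse_cons, List.foldl_append, List.foldl_cons, List.foldl_nil]
            by_cases hv : v ∈ path
            · simp only [if_pos hv]
              exact ihl stack rutas
            · simp only [if_neg hv, if_neg hgt]
              rw [ih (path ++ [v]) v (by simp) (by simp) (by simp; omega) _ rutas]
              exact ihl stack _
        conv_lhs => rw [pvRunStack]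
        rw [pvDfsA]
        simp only [if_neg hgt, hlast, if_neg hfin]
        exact inner _ stack rutas

-- ===== VERDICT (by name: the statement is the Claim_ definition above) =====
theorem encontrar_rutas_con_dfs_py_spec : Claim_equal_encontrar_rutas_con_dfs_py := by
  intro g i f md _
  unfold Spec_encontrar_rutas_con_dfs_py encontrar_rutas_con_dfs_py encontrar_rutas_con_dfs_py_alt
  rw [pvMain g f md (md + 1 - 1).toNat [i] i rfl (by simp) (by simp) [] []]
  rw [pvRunStack]
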